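-- pv_equiv track=rewrite | github.com/ganshyam135/Unstop-DSA-Bootcamp | SubArrays/Solution to Question - 2.py | countValidPartitions
-- ===== SOURCE A (Python) =====
-- def countValidPartitions(E, N):
--     # User logic goes here
--     if N < 3:
--         return 0  # Cannot form three zones if size < 3
--
--     prefix_sum = [0] * (N + 1)
--
--     # Step 1: Compute Prefix Sum
--     for i in range(N):
--         prefix_sum[i + 1] = prefix_sum[i] + E[i]
--
--     valid_count = 0
--
--     # Step 2: Iterate Over Possible Alpha Sizes
--     for size in range(1, N // 2 + 1):
--         if N - 2 * size <= 0:  # Ensure there is space for Beta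
--             break
--
--         sum_alpha = prefix_sum[size]  # Sum of Alpha (First 'size' elements)
--         sum_gamma = prefix_sum[N] - prefix_sum[N - size]  # Sum of Gamma (Last 'size' elements)
--         sum_beta = prefix_sum[N - size] - prefix_sum[size]  # Middle section (Beta)
--
--         # Check if Alpha + Gamma > Beta
--         if sum_alpha + sum_gamma > sum_beta:
--             valid_count += 1
--
--     return valid_count # Placeholder return value
-- ===== SOURCE B (Python) =====
-- def countValidPartitions(E, N):
--     if N < 3:
--         return 0
--     # Two-pointer peel: track the shrinking MIDDLE (beta) sum instead of the
--     # outer zones. alpha+gamma > beta  <=>  total - beta > beta  <=>  2*beta < total.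
--     beta = sum(E[:N])
--     total = beta
--     lo, hi = 0, N - 1
--     count = 0
--     while hi - lo >= 2:
--         beta -= E[lo] + E[hi]
--         if 2 * beta < total:
--             count += 1
--         lo += 1
--         hi -= 1
--     return count
-- ===== Notes on version B (the rewrite author's own statement) =====
-- stated objective: alternative
-- what changed: Replaces the prefix-sum table plus indexed for-loop over outer-zone sizes (break on N-2*size<=0, test alpha+gamma>beta) with a two-pointer peel: a while loop shrinks the array from both ends, maintaining only the middle-zone sum beta and testing the rearranged condition 2*beta < total.
import Mathlib
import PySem

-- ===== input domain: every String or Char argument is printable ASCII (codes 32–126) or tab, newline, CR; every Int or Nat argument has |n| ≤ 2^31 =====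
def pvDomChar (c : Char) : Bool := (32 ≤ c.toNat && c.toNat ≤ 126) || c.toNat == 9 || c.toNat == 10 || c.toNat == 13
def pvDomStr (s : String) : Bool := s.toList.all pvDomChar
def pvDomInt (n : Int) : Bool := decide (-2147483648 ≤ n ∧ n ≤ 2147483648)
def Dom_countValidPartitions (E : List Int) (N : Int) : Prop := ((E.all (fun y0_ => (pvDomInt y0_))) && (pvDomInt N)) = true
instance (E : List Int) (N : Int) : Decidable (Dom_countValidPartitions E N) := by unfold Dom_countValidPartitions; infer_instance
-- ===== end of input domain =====

-- B replaces A's prefix-sum table + size loop by a two-pointer peel tracking the middle sum (alternative decomposition, O(1) extra space).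

-- ===== PORT A =====
-- for i in range(N): prefix_sum[i+1] = prefix_sum[i] + E[i]
def pvA_build (E : List Int) (N : Int) : List Int :=
  (PySem.List.pyRange 0 N 1).foldl
    (fun p i => PySem.List.pySetD p (i + 1) (PySem.List.pyGetD p i 0 + PySem.List.pyGetD E i 0))
    (List.replicate (N + 1).toNat 0)

-- for size in range(1, N//2+1): if N-2*size<=0: break; … if sum_alpha+sum_gamma>sum_beta: valid_count+=1
def pvA_loop (pref : List Int) (N : Int) : List Int → Int → Int
  | [], acc => acc
  | s :: rest, acc =>
    if N - 2 * s ≤ 0 then acc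
    else
      let sum_alpha := PySem.List.pyGetD pref s 0
      let sum_gamma := PySem.List.pyGetD pref N 0 - PySem.List.pyGetD pref (N - s) 0
      let sum_beta := PySem.List.pyGetD pref (N - s) 0 - PySem.List.pyGetD pref s 0
      pvA_loop pref N rest (if sum_alpha + sum_gamma > sum_beta then acc + 1 else acc)

def countValidPartitions (E : List Int) (N : Int) : Int :=
  if N < 3 then 0
  else
    pvA_loop (pvA_build E N) N (PySem.List.pyRange 1 (PySem.Int.floordiv N 2 + 1) 1) 0

-- ===== PORT B =====
-- while hi - lo >= 2: beta -= E[lo] + E[hi]; if 2*beta < total: count += 1; lo += 1; hi -= 1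
def pvB_loop (E : List Int) (total : Int) (lo hi beta count : Int) : Int :=
  if h : 2 ≤ hi - lo then
    let beta' := beta - (PySem.List.pyGetD E lo 0 + PySem.List.pyGetD E hi 0)
    pvB_loop E total (lo + 1) (hi - 1) beta' (if 2 * beta' < total then count + 1 else count)
  else count
termination_by (hi - lo).toNat
decreasing_by omega

def countValidPartitions_alt (E : List Int) (N : Int) : Int :=
  if N < 3 then 0
  else
    let beta := (PySem.List.slice E none (some N)).sum
    pvB_loop E beta 0 (N - 1) beta 0

-- ===== PRECONDITION & SPEC =====
-- Pre_ excludes exactly the inputs where Python A raises IndexError: N ≥ 3 with fewer than N elements in E.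
def Pre_countValidPartitions (E : List Int) (N : Int) : Prop := N < 3 ∨ N ≤ E.length
instance (E : List Int) (N : Int) : Decidable (Pre_countValidPartitions E N) := by unfold Pre_countValidPartitions; infer_instance
def pvWitness_countValidPartitions : List Int × Int := ([3, -1, 2, 5], 4)

def Spec_countValidPartitions (E : List Int) (N : Int) (out : Int) : Prop := out = countValidPartitions_alt E N
instance (E : List Int) (N : Int) (out : Int) : Decidable (Spec_countValidPartitions E N out) := by unfold Spec_countValidPartitions; infer_instance

-- ===== CLAIM (what is proved, stated in full; the proofs are below) =====
def Claim_equal_countValidPartitions : Prop := ∀ (E : List Int) (N : Int), Dom_countValidPartitions E N → Pre_countValidPartitions E N → Spec_countValidPartitions E N (countValidPartitions E N)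

-- ===== LEMMAS AND PROOFS =====

-- prefix sums as take-sums
def pvT (E : List Int) (j : Nat) : Int := (E.take j).sum

lemma pvT_succ (E : List Int) (i : Nat) (h : i < E.length) :
    pvT E (i + 1) = pvT E i + E.getD i 0 := by
  rw [pvT, pvT, List.sum_take_succ E i h, List.getD_eq_getElem]

lemma pvA_build_inv (E : List Int) (n : Nat) (hlen : n ≤ E.length) :
    ∀ (k i : Nat) (p : List Int), i + k = n → p.length = n + 1 →
      (∀ j : Nat, j ≤ i → PySem.List.pyGetD p (j : Int) 0 = pvT E j) →
      ((PySem.List.pyRange (i : Int) (n : Int) 1).foldl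
          (fun p x => PySem.List.pySetD p (x + 1) (PySem.List.pyGetD p x 0 + PySem.List.pyGetD E x 0)) p).length = n + 1 ∧
      (∀ j : Nat, j ≤ n → PySem.List.pyGetD
          ((PySem.List.pyRange (i : Int) (n : Int) 1).foldl
            (fun p x => PySem.List.pySetD p (x + 1) (PySem.List.pyGetD p x 0 + PySem.List.pyGetD E x 0)) p) (j : Int) 0 = pvT E j) := by
  intro k
  induction k with
  | zero =>
    intro i p hik hlenp hinv
    have hi : i = n := by omega
    subst hi
    rw [PySem.List.pyRange_one_eq_nil le_rfl]
    exact ⟨hlenp, fun j hj => hinv j hj⟩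
  | succ k ih =>
    intro i p hik hlenp hinv
    have hlt : (i : Int) < (n : Int) := by exact_mod_cast Nat.lt_of_lt_of_le (by omega) le_rfl
    rw [PySem.List.pyRange_one_cons hlt]
    simp only [List.foldl_cons]
    have hcast : (i : Int) + 1 = ((i + 1 : Nat) : Int) := by push_cast; ring
    have hq : PySem.List.pySetD p ((i : Int) + 1) (PySem.List.pyGetD p (i : Int) 0 + PySem.List.pyGetD E (i : Int) 0)
        = p.set (i + 1) (PySem.List.pyGetD p (i : Int) 0 + PySem.List.pyGetD E (i : Int) 0) := by
      rw [hcast, PySem.List.pySetD_natCast]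
    have hlenq : (p.set (i + 1) (PySem.List.pyGetD p (i : Int) 0 + PySem.List.pyGetD E (i : Int) 0)).length = n + 1 := by
      simp [hlenp]
    have hEi : PySem.List.pyGetD E (i : Int) 0 = E.getD i 0 := PySem.List.pyGetD_natCast E i 0
    have hinv' : ∀ j : Nat, j ≤ i + 1 →
        PySem.List.pyGetD (p.set (i + 1) (PySem.List.pyGetD p (i : Int) 0 + PySem.List.pyGetD E (i : Int) 0)) (j : Int) 0 = pvT E j := by
      intro j hj
      rw [← PySem.List.pySetD_natCast (xs := p)]
      rw [PySem.List.pyGetD_pySetD_natCast p (i + 1) j _ 0 (by omega)]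
      by_cases hji : j = i + 1
      · subst hji
        rw [if_pos rfl, hinv i le_rfl, hEi, pvT_succ E i (by omega)]
      · rw [if_neg hji]
        exact hinv j (by omega)
    have := ih (i + 1) (p.set (i + 1) (PySem.List.pyGetD p (i : Int) 0 + PySem.List.pyGetD E (i : Int) 0)) (by omega) hlenq hinv'
    rw [hq, hcast]
    exact this

lemma pvA_build_getD (E : List Int) (n : Nat) (hlen : n ≤ E.length) (j : Nat) (hj : j ≤ n) :
    PySem.List.pyGetD (pvA_build E (n : Int)) (j : Int) 0 = pvT E j := by
  have h0 : ∀ j : Nat, j ≤ 0 → PySem.List.pyGetD (List.replicate (n + 1) (0 : Int)) (j : Int) 0 = pvT E j := by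
    intro j hj
    have : j = 0 := by omega
    subst this
    simp [pvT, PySem.List.pyGetD_zero, List.getD]
  have := pvA_build_inv E n hlen n 0 (List.replicate (n + 1) 0) (by omega) (by simp) h0
  have hN : ((n : Int) + 1).toNat = n + 1 := by omega
  unfold pvA_build
  rw [hN]
  exact this.2 j hj

-- A's range-loop over sizes equals B's two-pointer peel, related through pvT.
lemma pvLoops_eq (E : List Int) (n : Nat) (hlen : n ≤ E.length) :
    ∀ (k a : Nat) (acc : Int), 1 ≤ a → a + k = n / 2 + 1 →
      pvA_loop (pvA_build E (n : Int)) (n : Int) (PySem.List.pyRange (a : Int) ((n / 2 + 1 : Nat) : Int) 1) acc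
        = pvB_loop E (pvT E n) ((a : Int) - 1) ((n : Int) - a)
            (pvT E (n - (a - 1)) - pvT E (a - 1)) acc := by
  intro k
  induction k with
  | zero =>
    intro a acc ha hk
    rw [PySem.List.pyRange_one_eq_nil (by exact_mod_cast Nat.le_of_eq hk.symm)]
    have ha2 : a = n / 2 + 1 := by omega
    rw [pvB_loop]
    rw [dif_neg (by subst ha2; push_cast; omega)]
    simp [pvA_loop]
  | succ k ih =>
    intro a acc ha hk
    have hlt : (a : Int) < ((n / 2 + 1 : Nat) : Int) := by exact_mod_cast (by omega : a < n / 2 + 1)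
    rw [PySem.List.pyRange_one_cons hlt]
    by_cases hbrk : (n : Int) - 2 * (a : Int) ≤ 0
    · simp only [pvA_loop, if_pos hbrk]
      rw [pvB_loop, dif_neg (by omega)]
    · have h2a : 2 * a < n := by omega
      simp only [pvA_loop, if_neg hbrk]
      rw [pvB_loop, dif_pos (by omega : 2 ≤ ((n : Int) - a) - ((a : Int) - 1))]
      -- index casts
      have hna : (n : Int) - (a : Int) = ((n - a : Nat) : Int) := by omega
      have ham : (a : Int) - 1 = ((a - 1 : Nat) : Int) := by omega
      -- A's three table reads
      have hPa : PySem.List.pyGetD (pvA_build E (n : Int)) (a : Int) 0 = pvT E a :=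
        pvA_build_getD E n hlen a (by omega)
      have hPn : PySem.List.pyGetD (pvA_build E (n : Int)) (n : Int) 0 = pvT E n :=
        pvA_build_getD E n hlen n le_rfl
      have hPna : PySem.List.pyGetD (pvA_build E (n : Int)) ((n : Int) - (a : Int)) 0 = pvT E (n - a) := by
        rw [hna]; exact pvA_build_getD E n hlen (n - a) (by omega)
      -- B's two element reads
      have hEa : PySem.List.pyGetD E ((a : Int) - 1) 0 = E.getD (a - 1) 0 := by
        rw [ham]; exact PySem.List.pyGetD_natCast E (a - 1) 0
      have hEna : PySem.List.pyGetD E ((n : Int) - (a : Int)) 0 = E.getD (n - a) 0 := by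
        rw [ham, hna] at *
        exact PySem.List.pyGetD_natCast E (n - a) 0
      -- the peeled middle sum
      have hTa : pvT E ((a - 1) + 1) = pvT E (a - 1) + E.getD (a - 1) 0 := pvT_succ E (a - 1) (by omega)
      have hTna : pvT E ((n - a) + 1) = pvT E (n - a) + E.getD (n - a) 0 := pvT_succ E (n - a) (by omega)
      have ha1 : (a - 1) + 1 = a := by omega
      have hna1 : (n - a) + 1 = n - (a - 1) := by omega
      rw [ha1] at hTa
      rw [hna1] at hTna
      have hbeta : pvT E (n - (a - 1)) - pvT E (a - 1) - (PySem.List.pyGetD E ((a : Int) - 1) 0 + PySem.List.pyGetD E ((n : Int) - (a : Int)) 0)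
          = pvT E (n - a) - pvT E a := by
        rw [hEa, hEna]; omega
      rw [hPa, hPn, hPna, hbeta]
      -- the two guards are the same inequality rearranged
      have hcond : (pvT E (n - a) - pvT E a < pvT E a + (pvT E n - pvT E (n - a)))
          ↔ (2 * (pvT E (n - a) - pvT E a) < pvT E n) := by omega
      have hcast : (a : Int) + 1 = ((a + 1 : Nat) : Int) := by push_cast; ring
      have hargs1 : (a : Int) - 1 + 1 = ((a + 1 : Nat) : Int) - 1 := by push_cast; ring
      have hargs2 : (n : Int) - (a : Int) - 1 = (n : Int) - ((a + 1 : Nat) : Int) := by push_cast; ring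
      have hT1 : pvT E (n - a) - pvT E a = pvT E (n - ((a + 1) - 1)) - pvT E ((a + 1) - 1) := by
        simp
      rw [hcast, hargs1, hargs2, hT1]
      rw [ih (a + 1) _ (by omega) (by omega)]
      congr 1
      simp only [← hT1]
      split_ifs with h1 h2 h2
      · rfl
      · exact absurd (hcond.mp h1) h2
      · exact absurd (hcond.mpr h2) h1
      · rfl

-- ===== VERDICT (by name: the statement is the Claim_ definition above) =====
theorem countValidPartitions_spec : Claim_equal_countValidPartitions := by
  intro E N _hdom hpre
  unfold Spec_countValidPartitions countValidPartitions countValidPartitions_alt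
  by_cases hN : N < 3
  · simp [hN]
  · rw [if_neg hN, if_neg hN]
    have hlen : N ≤ E.length := by
      rcases hpre with h | h
      · omega
      · exact h
    obtain ⟨n, rfl⟩ : ∃ n : Nat, N = (n : Int) := ⟨N.toNat, by omega⟩
    have hn3 : 3 ≤ n := by exact_mod_cast not_lt.mp hN
    have hlen' : n ≤ E.length := by exact_mod_cast hlen
    have hfd : PySem.Int.floordiv (n : Int) 2 + 1 = ((n / 2 + 1 : Nat) : Int) := by
      rw [show ((2 : Int)) = ((2 : Nat) : Int) from rfl, PySem.Int.floordiv_natCast]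
      push_cast; ring
    have htot : (PySem.List.slice E none (some (n : Int))).sum = pvT E n := by
      rw [PySem.List.slice_to_natCast]; rfl
    rw [hfd, htot]
    have h1 : (1 : Int) = ((1 : Nat) : Int) := rfl
    rw [h1]
    have := pvLoops_eq E n hlen' (n / 2) 1 0 le_rfl (by omega)
    simpa [pvT] using this
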